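-- pv_equiv track=rewrite | github.com/varshaajio/LeetCode | solutions/4137-number-of-prefix-connected-groups/solution.py | prefixConnected
-- ===== SOURCE A (Python) =====
-- from typing import List
--
-- def prefixConnected(words: List[str], k: int) -> int:
--     c=0
--     d={}
--     for w in words:
--         if k<=len(w):
--             p=w[:k]
--             if p in d:
--                 d[p]+=1
--             else:
--                 d[p]=1
--     for k in d:
--         if 2<=d[k]:
--             c=c+1
--     return c
-- ===== SOURCE B (Python) =====
-- from typing import List
--
-- def prefixConnected(words: List[str], k: int) -> int:
--     # sort the prefixes and count runs of length >= 2 (no dict/counter)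
--     ps = sorted([w[:k] for w in words if k <= len(w)])
--     c = 0
--     run = 0
--     prev = None
--     for p in ps:
--         if run > 0 and p == prev:
--             run += 1
--         else:
--             if run >= 2:
--                 c += 1
--             run = 1
--             prev = p
--     if run >= 2:
--         c += 1
--     return c
-- ===== Notes on version B (the rewrite author's own statement) =====
-- stated objective: alternative
-- what changed: Replaces A's hash-dict frequency counting plus a second keys pass with sort-then-single-scan adjacent-run detection carrying (count, run length, previous prefix) state.
import Mathlib
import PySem

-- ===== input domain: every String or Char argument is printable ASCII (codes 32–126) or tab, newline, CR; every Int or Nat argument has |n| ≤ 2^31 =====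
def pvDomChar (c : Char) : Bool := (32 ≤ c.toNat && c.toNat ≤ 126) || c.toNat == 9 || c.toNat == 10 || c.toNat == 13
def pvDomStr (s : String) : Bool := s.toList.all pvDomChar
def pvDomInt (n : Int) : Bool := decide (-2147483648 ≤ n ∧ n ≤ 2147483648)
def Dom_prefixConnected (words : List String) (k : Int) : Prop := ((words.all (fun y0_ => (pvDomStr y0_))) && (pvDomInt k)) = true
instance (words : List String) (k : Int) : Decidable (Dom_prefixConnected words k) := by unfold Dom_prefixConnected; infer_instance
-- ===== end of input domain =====

-- B replaces A's dict frequency counting with sort-then-adjacent-run counting; alternative algorithm, similar cost.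


-- ===== PORT A =====
-- d[k] in the second loop is read as getD key 0; key is always present there, so it equals Python's d[k].
def prefixConnected (words : List String) (k : Int) : Int :=
  let d := words.foldl (fun (d : PySem.Dict String Int) w =>
      if k ≤ PySem.Str.len w then
        let p := PySem.Str.slice w none (some k)
        if d.contains p then d.modify p 0 (· + 1) else d.insert p 1
      else d) PySem.Dict.empty
  d.keys.foldl (fun c key => if (2:Int) ≤ d.getD key 0 then c + 1 else c) 0

-- ===== PORT B =====
def prefixConnected_alt (words : List String) (k : Int) : Int :=
  let ps := PySem.List.sorted (words.filterMap (fun w =>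
      if k ≤ PySem.Str.len w then some (PySem.Str.slice w none (some k)) else none)) (fun x => x) false
  let s := ps.foldl (fun (st : Int × Int × Option String) p =>
      if 0 < st.2.1 ∧ st.2.2 = some p then (st.1, st.2.1 + 1, st.2.2)
      else ((if 2 ≤ st.2.1 then st.1 + 1 else st.1), 1, some p)) (0, 0, none)
  if 2 ≤ s.2.1 then s.1 + 1 else s.1

-- ===== PRECONDITION & SPEC =====
def Spec_prefixConnected (words : List String) (k : Int) (out : Int) : Prop := out = prefixConnected_alt words k
instance (words : List String) (k : Int) (out : Int) : Decidable (Spec_prefixConnected words k out) := by unfold Spec_prefixConnected; infer_instance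

-- ===== CLAIM (what is proved, stated in full; the proofs are below) =====
def Claim_equal_prefixConnected : Prop := ∀ (words : List String) (k : Int), Dom_prefixConnected words k → Spec_prefixConnected words k (prefixConnected words k)

-- ===== LEMMAS AND PROOFS =====

-- the multiset of prefixes both programs count over
def pvPrefixes (words : List String) (k : Int) : List String :=
  words.filterMap (fun w =>
    if k ≤ PySem.Str.len w then some (PySem.Str.slice w none (some k)) else none)

-- the common value: number of distinct prefixes occurring at least twice
def pvCnt (ps : List String) : Int :=
  ((ps.toFinset.filter (fun p => 2 ≤ (ps.count p : Int))).card : Int)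

-- run-structured spec matching B's scan
def pvRunSpec : List String → Int
  | [] => 0
  | x :: xs =>
      (if 2 ≤ 1 + (xs.count x : Int) then 1 else 0) + pvRunSpec (xs.filter (fun y => y ≠ x))
termination_by ps => ps.length
decreasing_by
  have h := List.length_filter_le (fun y : {y // y ∈ xs} => decide (y.1 ≠ x)) xs.attach
  rw [List.length_attach] at h
  simp only [List.length_cons, List.length_unattach]
  exact Nat.lt_succ_of_le h

-- A's per-prefix dict step is exactly Counter's step
lemma stepA_eq_counter_step (d : PySem.Dict String Int) (p : String) :
    (if d.contains p then d.modify p 0 (· + 1) else d.insert p 1) = d.modify p 0 (· + 1) := by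
  by_cases h : d.contains p = true
  · simp [h]
  · have hf : d.items.find? (fun q => q.1 == p) = none := by
      apply List.find?_eq_none.2
      intro q hq
      simp [PySem.Dict.contains, List.any_eq_true] at h
      simp only [beq_iff_eq]
      rintro rfl
      exact h q.2 (by simpa using hq)
    simp [h, PySem.Dict.modify, PySem.Dict.getD, PySem.Dict.get?, hf]

-- A's loop over words equals the fold over the prefix list
lemma foldA_eq (words : List String) (k : Int) (d : PySem.Dict String Int) :
    words.foldl (fun (d : PySem.Dict String Int) w =>
      if k ≤ PySem.Str.len w then
        let p := PySem.Str.slice w none (some k)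
        if d.contains p then d.modify p 0 (· + 1) else d.insert p 1
      else d) d
    = (pvPrefixes words k).foldl (fun d x => d.modify x 0 (· + 1)) d := by
  have hfun : (fun (d : PySem.Dict String Int) w =>
      if k ≤ PySem.Str.len w then
        let p := PySem.Str.slice w none (some k)
        if d.contains p then d.modify p 0 (· + 1) else d.insert p 1
      else d)
      = (fun (d : PySem.Dict String Int) w =>
          if k ≤ PySem.Str.len w then d.modify (PySem.Str.slice w none (some k)) 0 (· + 1) else d) := by
    funext d w
    by_cases h : k ≤ PySem.Str.len w
    · simp only [if_pos h, stepA_eq_counter_step]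
    · simp only [if_neg h]
  rw [hfun]
  induction words generalizing d with
  | nil => simp [pvPrefixes]
  | cons w ws ih =>
    by_cases h : k ≤ PySem.Str.len w
    · simp only [pvPrefixes, List.filterMap_cons, if_pos h, List.foldl_cons]
      exact ih _
    · simp only [pvPrefixes, List.filterMap_cons, if_neg h, List.foldl_cons]
      exact ih _

-- counting fold = length of filter
lemma foldl_count_if (l : List String) (P : String → Prop) [DecidablePred P] (c : Int) :
    l.foldl (fun c x => if P x then c + 1 else c) c = c + ((l.filter (fun x => decide (P x))).length : Int) := by
  induction l generalizing c with
  | nil => simp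
  | cons x xs ih =>
    by_cases h : P x <;> simp [h, ih] <;> push_cast <;> ring

lemma A_eq_cnt (words : List String) (k : Int) :
    prefixConnected words k = pvCnt (pvPrefixes words k) := by
  unfold prefixConnected
  rw [foldA_eq, ← PySem.Dict.counter_eq_foldl]
  show (PySem.Dict.counter (pvPrefixes words k)).keys.foldl
      (fun c key => if (2:Int) ≤ (PySem.Dict.counter (pvPrefixes words k)).getD key 0 then c + 1 else c) 0
    = pvCnt (pvPrefixes words k)
  rw [PySem.Dict.keys_counter]
  set ps := pvPrefixes words k
  rw [foldl_count_if _ (fun key => (2:Int) ≤ (PySem.Dict.counter ps).getD key 0) 0]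
  have hpred : (fun (x : String) => decide ((2:Int) ≤ (PySem.Dict.counter ps).getD x 0))
      = (fun x => decide ((2:Int) ≤ (ps.count x : Int))) := by
    funext x; rw [PySem.Dict.getD_counter]
  rw [hpred, ← PySem.List.dedup_eq_ofList]
  have hnd : (PySem.List.dedup ps).Nodup := PySem.List.nodup_dedup ps
  have h1 : ((PySem.List.dedup ps).filter (fun x => decide ((2:Int) ≤ (ps.count x : Int)))).toFinset.card
      = ((PySem.List.dedup ps).filter (fun x => decide ((2:Int) ≤ (ps.count x : Int)))).length :=
    List.toFinset_card_of_nodup (hnd.filter _)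
  have h2 : (PySem.List.dedup ps).toFinset = ps.toFinset := by
    ext x; simp
  rw [pvCnt, ← h1, List.toFinset_filter, h2]
  norm_num

lemma runSpec_eq_cnt (ps : List String) : pvRunSpec ps = pvCnt ps := by
  induction ps using pvRunSpec.induct with
  | case1 => simp [pvRunSpec, pvCnt]
  | case2 x xs ih =>
    rw [List.unattach_filter (g := fun y => decide (y ≠ x)) (hf := fun a h => rfl), List.unattach_attach] at ih
    rw [pvRunSpec, ih]
    unfold pvCnt
    -- relate the filtered-list Finset to an erase
    have hfin : (xs.filter (fun y => y ≠ x)).toFinset = xs.toFinset.erase x := by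
      ext p; simp [Finset.mem_erase, and_comm]
    have hcnt : ∀ p : String, p ≠ x → (xs.filter (fun y => y ≠ x)).count p = xs.count p := by
      intro p hp
      rw [List.count_filter]
      simp [hp]
    have hpredeq : ∀ p ∈ xs.toFinset.erase x,
        (2 ≤ ((xs.filter (fun y => y ≠ x)).count p : Int)) = (2 ≤ ((x :: xs).count p : Int)) := by
      intro p hp
      have hpx : p ≠ x := (Finset.mem_erase.1 hp).1
      rw [hcnt p hpx, List.count_cons_of_ne (Ne.symm hpx)]
    have h1 : (xs.filter (fun y => y ≠ x)).toFinset.filter (fun p => 2 ≤ ((xs.filter (fun y => y ≠ x)).count p : Int))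
        = (xs.toFinset.erase x).filter (fun p => 2 ≤ (((x :: xs)).count p : Int)) := by
      rw [hfin]
      apply Finset.filter_congr
      intro p hp
      rw [hpredeq p hp]
    rw [h1]
    -- now pure Finset card arithmetic
    have hcx : ((x :: xs).count x : Int) = 1 + (xs.count x : Int) := by
      rw [List.count_cons_self]; push_cast; ring
    have hins : (x :: xs).toFinset = insert x xs.toFinset := by simp
    rw [hins]
    by_cases hP : 2 ≤ 1 + ((xs.count x : Int))
    · have hPx : 2 ≤ (((x :: xs)).count x : Int) := by rw [hcx]; exact hP
      rw [if_pos hP]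
      rw [Finset.filter_insert, if_pos hPx, Finset.filter_erase]
      have he : insert x (xs.toFinset.filter (fun p => 2 ≤ ((x :: xs).count p : Int)))
          = insert x ((xs.toFinset.filter (fun p => 2 ≤ ((x :: xs).count p : Int))).erase x) := by
        ext a; by_cases hax : a = x <;> simp [hax]
      rw [he, Finset.card_insert_of_notMem (Finset.notMem_erase x _)]
      push_cast; ring
    · rw [if_neg hP]
      have hx0 : xs.count x = 0 := by omega
      have hxnot : x ∉ xs := by rwa [← List.count_eq_zero]
      have herase : xs.toFinset.erase x = xs.toFinset := Finset.erase_eq_of_notMem (by simpa)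
      have : (insert x xs.toFinset).filter (fun p => 2 ≤ ((x :: xs).count p : Int))
          = xs.toFinset.filter (fun p => 2 ≤ ((x :: xs).count p : Int)) := by
        rw [Finset.filter_insert, if_neg (by rw [hcx]; omega)]
      rw [this, herase]
      push_cast; ring


-- the scan invariant on a sorted tail
lemma scan_inv (ys : List String) : ∀ (c r : Int) (q : String),
    ys.Pairwise (· ≤ ·) → (∀ y ∈ ys, q ≤ y) → 1 ≤ r →
    (let s := ys.foldl (fun (st : Int × Int × Option String) p =>
        if 0 < st.2.1 ∧ st.2.2 = some p then (st.1, st.2.1 + 1, st.2.2)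
        else ((if 2 ≤ st.2.1 then st.1 + 1 else st.1), 1, some p)) (c, r, some q)
     if 2 ≤ s.2.1 then s.1 + 1 else s.1)
    = c + (if 2 ≤ r + (ys.count q : Int) then 1 else 0) + pvRunSpec (ys.filter (fun y => y ≠ q)) := by
  induction ys with
  | nil =>
    intro c r q _ _ hr
    simp only [List.foldl_nil, List.count_nil, List.filter_nil, pvRunSpec]
    norm_num
    split_ifs <;> omega
  | cons y ys ih =>
    intro c r q hpair hall hr
    simp only [List.foldl_cons]
    by_cases hqy : q = y
    · subst hqy
      have hc : (0 < r ∧ (some q : Option String) = some q) := ⟨by omega, rfl⟩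
      rw [if_pos hc]
      have h1 := ih c (r + 1) q hpair.tail (fun e he => hall e (List.mem_cons_of_mem _ he)) (by omega)
      simp only at h1 ⊢
      rw [h1, List.count_cons_self, List.filter_cons,
          if_neg (by simp : ¬ (decide (q ≠ q)) = true)]
      push_cast
      split_ifs <;> first | rfl | (exfalso; omega)
    · rw [if_neg (by simp [hqy] : ¬ (0 < r ∧ (some q : Option String) = some y))]
      have hqlt : q < y := lt_of_le_of_ne (hall y List.mem_cons_self) (hqy)
      have hally : ∀ e ∈ ys, y ≤ e := (List.pairwise_cons.1 hpair).1
      have hcnt0 : List.count q (y :: ys) = 0 := by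
        rw [List.count_eq_zero]
        intro hmem
        rcases List.mem_cons.1 hmem with h | h
        · exact absurd h.symm (ne_of_gt hqlt)
        · exact absurd rfl (ne_of_gt (lt_of_lt_of_le hqlt (hally q h)))
      have hfq : (y :: ys).filter (fun z => decide (z ≠ q)) = y :: ys := by
        rw [List.filter_cons, if_pos (by simp [ne_of_gt hqlt] : (decide (y ≠ q)) = true)]
        congr 1
        rw [List.filter_eq_self]
        intro e he
        simp [ne_of_gt (lt_of_lt_of_le hqlt (hally e he))]
      have h1 := ih (if 2 ≤ r then c + 1 else c) 1 y hpair.tail hally le_rfl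
      simp only at h1 ⊢
      rw [h1, hcnt0, hfq, pvRunSpec]
      push_cast
      simp only [add_zero]
      split_ifs <;> ring

lemma B_eq_runSpec (words : List String) (k : Int) :
    prefixConnected_alt words k = pvRunSpec (PySem.List.sorted (pvPrefixes words k) (fun x => x) false) := by
  unfold prefixConnected_alt
  simp only []
  have hp := PySem.List.sorted_pairwise (pvPrefixes words k) (fun x => x)
  rcases hys : PySem.List.sorted (pvPrefixes words k) (fun x => x) false with _ | ⟨y, t⟩
  · rw [show (words.filterMap (fun w =>
        if k ≤ PySem.Str.len w then some (PySem.Str.slice w none (some k)) else none)) = pvPrefixes words k from rfl, hys]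
    simp [pvRunSpec]
  · rw [show (words.filterMap (fun w =>
        if k ≤ PySem.Str.len w then some (PySem.Str.slice w none (some k)) else none)) = pvPrefixes words k from rfl, hys]
    rw [hys] at hp
    simp only [List.foldl_cons]
    rw [if_neg (by simp : ¬ ((0:Int) < 0 ∧ (none : Option String) = some y))]
    rw [if_neg (by norm_num : ¬ (2:Int) ≤ 0)]
    have h := scan_inv t 0 1 y hp.tail (List.pairwise_cons.1 hp).1 le_rfl
    simp only at h
    rw [h, pvRunSpec]
    push_cast
    split_ifs <;> ring

lemma cnt_perm {ps qs : List String} (h : ps.Perm qs) : pvCnt ps = pvCnt qs := by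
  unfold pvCnt
  have hf : ps.toFinset = qs.toFinset := by ext a; simp [h.mem_iff]
  rw [hf, Finset.filter_congr (s := qs.toFinset)
    (p := fun p => 2 ≤ (ps.count p : Int)) (q := fun p => 2 ≤ (qs.count p : Int))
    (fun x _ => by simp only []; rw [h.count_eq x])]

-- ===== VERDICT (by name: the statement is the Claim_ definition above) =====
theorem prefixConnected_spec : Claim_equal_prefixConnected := by
  intro words k _
  show prefixConnected words k = prefixConnected_alt words k
  rw [A_eq_cnt, B_eq_runSpec, runSpec_eq_cnt,
      cnt_perm (PySem.List.sorted_perm (pvPrefixes words k) (fun x => x) false)]
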